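-- pv_equiv track=rewrite | github.com/AxelRubini/InterferenceCreator | processor.py | estrai_motori_da_root
-- ===== SOURCE A (Python) =====
-- def estrai_motori_da_root(root: str):
--     """
--     Da root come "MC4_MOTOREA_MC4_MOTOREB" restituisce (prefix, motoreA, motoreB).
--     Se il formato non è corretto solleva ValueError.
--     """
--     tokens = root.split("_")
--     if len(tokens) < 4:
--         raise ValueError(f"Root non conforme: '{root}'")
--     prefix = tokens[0]
--     idx = next((i for i in range(1, len(tokens)) if tokens[i] == prefix), None)
--     if idx is None or idx == len(tokens) - 1:
--         raise ValueError(f"Formato root invalido: '{root}'")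
--     motA = "_".join(tokens[1:idx])
--     motB = "_".join(tokens[idx + 1 :])
--     return prefix, motA, motB
-- ===== SOURCE B (Python) =====
-- def estrai_motori_da_root(root: str):
--     """
--     Da root come "MC4_MOTOREA_MC4_MOTOREB" restituisce (prefix, motoreA, motoreB).
--     Se il formato non e' corretto solleva ValueError.
--     Substring search instead of token scanning: the split point is the first
--     occurrence of "_" + prefix + "_" in root.
--     """
--     if root.count("_") < 3:
--         raise ValueError(f"Root non conforme: '{root}'")
--     prefix = root[: root.find("_")]
--     pos = root.find("_" + prefix + "_")
--     if pos == -1: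
--         raise ValueError(f"Formato root invalido: '{root}'")
--     return prefix, root[len(prefix) + 1 : pos], root[pos + len(prefix) + 2 :]
-- ===== Notes on version B (the rewrite author's own statement) =====
-- stated objective: alternative
-- what changed: B never builds the token list: it locates the split point by searching root for the substring formed by an underscore, the prefix (read up to the first underscore) and another underscore, and returns three direct slices of root, instead of splitting on underscores, scanning the token list for a token equal to the prefix and re-joining two token slices.
import Mathlib
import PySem

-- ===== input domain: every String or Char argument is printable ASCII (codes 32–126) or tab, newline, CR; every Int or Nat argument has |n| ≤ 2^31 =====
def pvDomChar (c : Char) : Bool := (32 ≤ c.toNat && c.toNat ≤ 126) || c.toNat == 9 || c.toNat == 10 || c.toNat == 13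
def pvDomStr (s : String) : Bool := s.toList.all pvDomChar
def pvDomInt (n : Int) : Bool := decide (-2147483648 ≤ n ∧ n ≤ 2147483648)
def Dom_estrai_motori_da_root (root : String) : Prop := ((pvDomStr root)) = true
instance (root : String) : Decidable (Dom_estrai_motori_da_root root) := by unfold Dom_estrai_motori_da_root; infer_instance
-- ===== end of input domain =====

-- B replaces A's token-list scan by a direct substring search for "_"+pref+"_" and
-- returns three slices of root (objective: alternative decomposition, same cost).

-- ===== PORT A =====
-- literal port of A; the two `raise ValueError` branches return ("","","") and are
-- excluded by Pre_estrai_motori_da_root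
def estrai_motori_da_root (root : String) : String × String × String :=
  let tokens := PySem.Chars.splitOn root.toList "_".toList
  if tokens.length < 4 then ("", "", "")   -- raise ValueError("Root non conforme: …")
  else
    let pref := tokens.headD []
    match (PySem.List.pyRange 1 (PySem.List.len tokens) 1).find?
        (fun i => PySem.List.pyGetD tokens i [] == pref) with
    | none => ("", "", "")                 -- idx is None … raise ValueError("Formato root invalido: …")
    | some idx =>
      if idx == PySem.List.len tokens - 1 then ("", "", "")  -- idx == len(tokens)-1 … raise
      else
        (String.ofList pref,
         String.ofList (PySem.Chars.join "_".toList (PySem.List.slice tokens (some 1) (some idx))),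
         String.ofList (PySem.Chars.join "_".toList (PySem.List.slice tokens (some (idx + 1)) none)))

-- ===== PORT B =====
-- literal port of Source B; the two `raise ValueError` branches return ("","","")
def estrai_motori_da_root_alt (root : String) : String × String × String :=
  let cs := root.toList
  if PySem.Chars.count cs "_".toList < 3 then ("", "", "")  -- raise ValueError("Root non conforme: …")
  else
    let pref := PySem.Chars.slice cs none (some (PySem.Chars.find cs "_".toList))
    let pos := PySem.Chars.find cs ('_' :: (pref ++ ['_']))
    if pos == -1 then ("", "", "")          -- raise ValueError("Formato root invalido: …")
    else
      (String.ofList pref,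
       String.ofList (PySem.Chars.slice cs (some ((pref.length : Int) + 1)) (some pos)),
       String.ofList (PySem.Chars.slice cs (some (pos + (pref.length : Int) + 2)) none))

-- ===== PRECONDITION & SPEC =====
-- Pre_ holds exactly where the Python A returns normally: at least four underscore-separated
-- tokens, and the first token occurs again among the middle tokens (else A raises ValueError).
def Pre_estrai_motori_da_root (root : String) : Prop :=
  let ts := PySem.Chars.splitOn root.toList "_".toList
  4 ≤ ts.length ∧ ts.headD [] ∈ (ts.drop 1).dropLast

instance (root : String) : Decidable (Pre_estrai_motori_da_root root) := by
  unfold Pre_estrai_motori_da_root; infer_instance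

def pvWitness_estrai_motori_da_root : String := "MC4_MOTOREA_MC4_MOTOREB"

def Spec_estrai_motori_da_root (root : String) (out : String × String × String) : Prop := out = estrai_motori_da_root_alt root
instance (root : String) (out : String × String × String) : Decidable (Spec_estrai_motori_da_root root out) := by unfold Spec_estrai_motori_da_root; infer_instance

-- ===== CLAIM (what is proved, stated in full; the proofs are below) =====
def Claim_equal_estrai_motori_da_root : Prop := ∀ (root : String), Dom_estrai_motori_da_root root → Pre_estrai_motori_da_root root → Spec_estrai_motori_da_root root (estrai_motori_da_root root)

-- ===== LEMMAS AND PROOFS =====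

-- `pvMapHead f` applies f to the head piece only
def pvMapHead (f : List Char → List Char) : List (List Char) → List (List Char)
  | [] => []
  | h :: t => f h :: t

-- reference tokenizer: split on '_' keeping empty pieces
def pvTok : List Char → List (List Char)
  | [] => [[]]
  | c :: t => if '_' = c then [] :: pvTok t else pvMapHead (fun x => c :: x) (pvTok t)

-- the tail part of an intercalation: '_' before every piece
def pvT (xs : List (List Char)) : List Char := xs.flatMap (fun t => '_' :: t)

theorem pvTok_ne_nil (l : List Char) : pvTok l ≠ [] := by
  induction l with
  | nil => simp [pvTok]
  | cons c t ih =>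
    simp only [pvTok]; split
    · simp
    · cases h : pvTok t with
      | nil => exact absurd h ih
      | cons a b => simp [pvMapHead]

theorem pvGo_spec (fuel : Nat) : ∀ (l cur : List Char) (acc : List (List Char)),
    l.length ≤ fuel →
    PySem.Chars.splitOn.go ['_'] fuel l cur acc
      = acc.reverse ++ pvMapHead (fun x => cur.reverse ++ x) (pvTok l) := by
  induction fuel with
  | zero =>
    intro l cur acc h
    have : l = [] := by cases l <;> simp_all
    subst this
    simp [PySem.Chars.splitOn.go, pvTok, pvMapHead]
  | succ n ih =>
    intro l cur acc h
    cases l with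
    | nil => simp [PySem.Chars.splitOn.go, pvTok, pvMapHead]
    | cons c t =>
      have hrec : PySem.Chars.splitOn.go ['_'] (n+1) (c::t) cur acc
          = if '_' = c then PySem.Chars.splitOn.go ['_'] n t [] (cur.reverse :: acc)
            else PySem.Chars.splitOn.go ['_'] n t (c :: cur) acc := by
        simp [PySem.Chars.splitOn.go, List.isPrefixOf]
      rw [hrec]
      have ht : t.length ≤ n := by simpa using h
      by_cases hc : '_' = c
      · rw [if_pos hc]
        rw [ih t [] _ ht]
        simp only [pvTok, if_pos hc]
        cases htok : pvTok t with
        | nil => exact absurd htok (pvTok_ne_nil t)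
        | cons a b => simp [pvMapHead]
      · rw [if_neg hc]
        rw [ih t (c :: cur) acc ht]
        simp only [pvTok, if_neg hc]
        cases htok : pvTok t with
        | nil => exact absurd htok (pvTok_ne_nil t)
        | cons a b => simp [pvMapHead]

theorem pvSplitOn_eq_tok (cs : List Char) : PySem.Chars.splitOn cs ['_'] = pvTok cs := by
  have : PySem.Chars.splitOn cs ['_'] = PySem.Chars.splitOn.go ['_'] (cs.length+1) cs [] [] := rfl
  rw [this, pvGo_spec _ _ _ _ (by omega)]
  cases htok : pvTok cs with
  | nil => exact absurd htok (pvTok_ne_nil cs)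
  | cons a b => simp [pvMapHead]

theorem pvJ_cons (x : List Char) (xs : List (List Char)) :
    PySem.Chars.join ['_'] (x :: xs) = x ++ pvT xs := by
  induction xs generalizing x with
  | nil => simp [PySem.Chars.join, pvT, List.intercalate]
  | cons y ys ih =>
    have h2 := PySem.Chars.join_cons_cons ['_'] x y ys
    rw [h2, ih y]
    simp [pvT]

theorem pvTok_join (l : List Char) : PySem.Chars.join ['_'] (pvTok l) = l := by
  induction l with
  | nil => simp [pvTok]
  | cons c t ih =>
    simp only [pvTok]
    by_cases hc : '_' = c
    · rw [if_pos hc]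
      cases htok : pvTok t with
      | nil => exact absurd htok (pvTok_ne_nil t)
      | cons a b =>
        rw [pvJ_cons]
        rw [htok] at ih
        rw [pvJ_cons] at ih
        simpa [pvT, ← hc] using ih
    · rw [if_neg hc]
      cases htok : pvTok t with
      | nil => exact absurd htok (pvTok_ne_nil t)
      | cons a b =>
        simp only [pvMapHead, pvJ_cons]
        rw [htok, pvJ_cons] at ih
        simp [ih]

theorem pvTok_no_sep (l : List Char) : ∀ t ∈ pvTok l, '_' ∉ t := by
  induction l with
  | nil => simp [pvTok]
  | cons c t ih =>
    simp only [pvTok]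
    by_cases hc : '_' = c
    · rw [if_pos hc]
      intro u hu
      rw [List.mem_cons] at hu
      rcases hu with h | h
      · subst h; simp
      · exact ih u h
    · rw [if_neg hc]
      cases htok : pvTok t with
      | nil => exact absurd htok (pvTok_ne_nil t)
      | cons a b =>
        rw [htok] at ih
        intro u hu
        simp only [pvMapHead, List.mem_cons] at hu
        rcases hu with h | h
        · subst h
          intro hmem
          rcases List.mem_cons.mp hmem with h2 | h2
          · exact hc h2
          · exact ih a (by simp) h2
        · exact ih u (by simp [h])

theorem pvTok_length (l : List Char) : (pvTok l).length = l.count '_' + 1 := by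
  induction l with
  | nil => simp [pvTok]
  | cons c t ih =>
    simp only [pvTok]
    by_cases hc : '_' = c
    · rw [if_pos hc]
      simp [← hc, ih]
    · rw [if_neg hc]
      cases htok : pvTok t with
      | nil => exact absurd htok (pvTok_ne_nil t)
      | cons a b =>
        rw [htok] at ih
        simp only [pvMapHead, List.length_cons] at ih ⊢
        rw [List.count_cons]
        simp [ih, Ne.symm hc]

theorem pvCountGo_spec (fuel : Nat) : ∀ (l : List Char) (acc : Nat), l.length ≤ fuel →
    PySem.Chars.count.go ['_'] fuel l acc = acc + l.count '_' := by
  induction fuel with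
  | zero =>
    intro l acc h
    have : l = [] := by cases l <;> simp_all
    subst this
    simp [PySem.Chars.count.go]
  | succ n ih =>
    intro l acc h
    cases l with
    | nil => simp [PySem.Chars.count.go]
    | cons c t =>
      have hrec : PySem.Chars.count.go ['_'] (n+1) (c::t) acc
          = if '_' = c then PySem.Chars.count.go ['_'] n t (acc+1)
            else PySem.Chars.count.go ['_'] n t acc := by
        simp [PySem.Chars.count.go, List.isPrefixOf]
      rw [hrec]
      have ht : t.length ≤ n := by simpa using h
      by_cases hc : '_' = c
      · rw [if_pos hc, ih t (acc+1) ht, List.count_cons]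
        simp [← hc]
        omega
      · rw [if_neg hc, ih t acc ht, List.count_cons]
        simp [Ne.symm hc]

theorem pvCount_eq (cs : List Char) : PySem.Chars.count cs ['_'] = cs.count '_' := by
  have : PySem.Chars.count cs ['_'] = PySem.Chars.count.go ['_'] cs.length cs 0 := rfl
  rw [this, pvCountGo_spec cs.length cs 0 le_rfl]; omega

theorem pvSplitFirst {α : Type} (p : α) (us : List α) (h : p ∈ us) :
    ∃ mid rest, us = mid ++ p :: rest ∧ p ∉ mid := by
  induction us with
  | nil => simp at h
  | cons a t ih =>
    by_cases ha : p = a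
    · exact ⟨[], t, by simp [ha], by simp⟩
    · have : p ∈ t := (List.mem_cons.mp h).resolve_left ha
      obtain ⟨mid, rest, heq, hnp⟩ := ih this
      exact ⟨a :: mid, rest, by simp [heq], by simp [hnp, ha]⟩

theorem pvFindGo_skip (q : List Char) : ∀ (p : List Char) (u : List Char), '_' ∉ p → ∀ k : Nat,
    PySem.Chars.find.go ('_' :: q) (p ++ u) k = PySem.Chars.find.go ('_' :: q) u (k + p.length) := by
  intro p
  induction p with
  | nil => intro u _ k; simp
  | cons c t ih =>
    intro u hp k
    have hc : c ≠ '_' := by intro h; exact hp (by simp [h])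
    have hrec : PySem.Chars.find.go ('_'::q) (c :: (t ++ u)) k
        = if List.isPrefixOf ('_'::q) (c :: (t++u)) then (k:Int) else PySem.Chars.find.go ('_'::q) (t++u) (k+1) := by
      rw [PySem.Chars.find.go]
    have hpre : List.isPrefixOf ('_'::q) (c :: (t++u)) = false := by
      simp [List.isPrefixOf, Ne.symm hc]
    simp only [List.cons_append, hrec, hpre]
    rw [ih u (fun h => hp (by simp [h])) (k+1)]
    have harg : k + 1 + t.length = k + (c :: t).length := by simp; omega
    rw [harg]
    simp

theorem pvNP (p m u : List Char) (hp : '_' ∉ p) (hm : '_' ∉ m) (hne : m ≠ p) :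
    ¬ (p ++ ['_'] <+: m ++ '_' :: u) := by
  intro h
  rcases Nat.lt_trichotomy p.length m.length with hlt | heq | hgt
  · have hget := h.getElem (i := p.length) (by simp)
    rw [List.getElem_append_right (by simp)] at hget
    simp at hget
    rw [List.getElem_append_left hlt] at hget
    exact hm (hget ▸ List.getElem_mem _)
  · have hall : ∀ i (hi : i < p.length), p[i] = m[i]'(heq ▸ hi) := by
      intro i hi
      have hget := h.getElem (i := i) (by simp; omega)
      rw [List.getElem_append_left hi, List.getElem_append_left (heq ▸ hi)] at hget
      exact hget
    exact hne (List.ext_getElem heq.symm (fun i h1 h2 => (hall i h2).symm))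
  · have hget := h.getElem (i := m.length) (by simp; omega)
    rw [List.getElem_append_left hgt] at hget
    rw [List.getElem_append_right (le_refl m.length)] at hget
    simp at hget
    exact hp (hget ▸ List.getElem_mem _)


theorem pvFindGo_T (p : List Char) (hp : '_' ∉ p) :
    ∀ (mid : List (List Char)) (z : List Char) (k : Nat),
      (∀ t ∈ mid, '_' ∉ t) → p ∉ mid →
      PySem.Chars.find.go ('_' :: (p ++ ['_'])) (pvT mid ++ '_' :: (p ++ '_' :: z)) k
        = (k : Int) + (pvT mid).length := by
  intro mid
  induction mid with
  | nil =>
    intro z k _ _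
    have hrec : PySem.Chars.find.go ('_' :: (p ++ ['_'])) ('_' :: (p ++ '_' :: z)) k
        = if List.isPrefixOf ('_' :: (p ++ ['_'])) ('_' :: (p ++ '_' :: z)) then (k:Int)
          else PySem.Chars.find.go ('_' :: (p ++ ['_'])) (p ++ '_' :: z) (k+1) := by
      rw [PySem.Chars.find.go]
    have hpre : List.isPrefixOf ('_' :: (p ++ ['_'])) ('_' :: (p ++ '_' :: z)) = true := by
      rw [List.isPrefixOf_iff_prefix]
      refine List.cons_prefix_cons.mpr ⟨rfl, ?_⟩
      exact ⟨z, by simp⟩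
    simp [pvT, hrec, hpre]
  | cons m mid' ih =>
    intro z k hfree hnp
    have hm : '_' ∉ m := hfree m (by simp)
    have hTm : pvT (m :: mid') = '_' :: (m ++ pvT mid') := by simp [pvT]
    -- the string is '_' :: (m ++ pvT mid' ++ '_' :: (p ++ '_' :: z))
    have hstr : pvT (m :: mid') ++ '_' :: (p ++ '_' :: z)
        = '_' :: (m ++ (pvT mid' ++ '_' :: (p ++ '_' :: z))) := by simp [hTm]
    rw [hstr]
    have hrec : PySem.Chars.find.go ('_' :: (p ++ ['_'])) ('_' :: (m ++ (pvT mid' ++ '_' :: (p ++ '_' :: z)))) k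
        = if List.isPrefixOf ('_' :: (p ++ ['_'])) ('_' :: (m ++ (pvT mid' ++ '_' :: (p ++ '_' :: z)))) then (k:Int)
          else PySem.Chars.find.go ('_' :: (p ++ ['_'])) (m ++ (pvT mid' ++ '_' :: (p ++ '_' :: z))) (k+1) := by
      rw [PySem.Chars.find.go]
    have hw : ∃ w', pvT mid' ++ '_' :: (p ++ '_' :: z) = '_' :: w' := by
      cases mid' with
      | nil => exact ⟨p ++ '_' :: z, by simp [pvT]⟩
      | cons a b => exact ⟨a ++ pvT b ++ '_' :: (p ++ '_' :: z), by simp [pvT]⟩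
    obtain ⟨w', hw'⟩ := hw
    have hpre : List.isPrefixOf ('_' :: (p ++ ['_'])) ('_' :: (m ++ (pvT mid' ++ '_' :: (p ++ '_' :: z)))) = false := by
      rw [Bool.eq_false_iff]
      intro hT
      rw [List.isPrefixOf_iff_prefix] at hT
      have h2 : p ++ ['_'] <+: m ++ '_' :: w' := by
        have := (List.cons_prefix_cons.mp hT).2
        rwa [hw'] at this
      exact pvNP p m w' hp hm (fun he => hnp (by simp [he])) h2
    rw [hrec, hpre]
    simp only [Bool.false_eq_true, if_false]
    rw [pvFindGo_skip _ m _ hm]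
    rw [ih z (k + 1 + m.length) (fun t ht => hfree t (by simp [ht])) (fun h => hnp (by simp [h]))]
    rw [hTm]
    simp only [List.length_cons, List.length_append]
    push_cast
    ring

theorem pvFind_sep (p w : List Char) (hp : '_' ∉ p) :
    PySem.Chars.find (p ++ '_' :: w) ['_'] = (p.length : Int) := by
  have h0 : PySem.Chars.find (p ++ '_' :: w) ['_'] = PySem.Chars.find.go ['_'] (p ++ '_' :: w) 0 := rfl
  rw [h0, pvFindGo_skip [] p ('_' :: w) hp 0]
  rw [PySem.Chars.find.go]
  simp [List.isPrefixOf]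

theorem pvFind_pat (p : List Char) (hp : '_' ∉ p) (mid : List (List Char)) (z : List Char)
    (hmid : ∀ t ∈ mid, '_' ∉ t) (hnp : p ∉ mid) :
    PySem.Chars.find (p ++ (pvT mid ++ '_' :: (p ++ '_' :: z))) ('_' :: (p ++ ['_']))
      = (p.length : Int) + (pvT mid).length := by
  have h0 : PySem.Chars.find (p ++ (pvT mid ++ '_' :: (p ++ '_' :: z))) ('_' :: (p ++ ['_']))
      = PySem.Chars.find.go ('_' :: (p ++ ['_'])) (p ++ (pvT mid ++ '_' :: (p ++ '_' :: z))) 0 := rfl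
  rw [h0, pvFindGo_skip _ p _ hp 0, pvFindGo_T p hp mid z (0 + p.length) hmid hnp]
  push_cast
  ring

-- evaluation of port A on the decomposed input
theorem pvA_eval (root : String) (p r0 : List Char) (mid rest' : List (List Char))
    (htok : pvTok root.toList = p :: (mid ++ p :: (r0 :: rest')))
    (hnp : p ∉ mid) (hge : 1 ≤ mid.length + rest'.length) :
    estrai_motori_da_root root
      = (String.ofList p, String.ofList (PySem.Chars.join ['_'] mid),
         String.ofList (PySem.Chars.join ['_'] (r0 :: rest'))) := by
  have hfree := pvTok_no_sep root.toList
  rw [htok] at hfree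
  have hnpm : p ∉ mid := hnp
  unfold estrai_motori_da_root
  simp only []
  rw [show "_".toList = ['_'] from rfl, pvSplitOn_eq_tok, htok]
  rw [if_neg (by simp; omega)]
  simp only [List.headD_cons]
  have hlen2 : (p :: (mid ++ p :: r0 :: rest')).length = mid.length + rest'.length + 3 := by
    simp; omega
  have hfind? : (PySem.List.pyRange 1 (PySem.List.len (p :: (mid ++ p :: r0 :: rest'))) 1).find?
      (fun i => PySem.List.pyGetD (p :: (mid ++ p :: r0 :: rest')) i [] == p)
      = some ((1 + mid.length : Nat) : Int) := by
    rw [PySem.List.len_eq, hlen2]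
    rw [PySem.List.pyRange_one_append 1 ((1 + mid.length : Nat) : Int)
      ((mid.length + rest'.length + 3 : Nat) : Int) (by push_cast; omega) (by push_cast; omega)]
    rw [List.find?_append]
    have h1 : (PySem.List.pyRange 1 ((1 + mid.length : Nat) : Int)).find?
        (fun i => PySem.List.pyGetD (p :: (mid ++ p :: r0 :: rest')) i [] == p) = none := by
      rw [List.find?_eq_none]
      intro x hx
      rw [PySem.List.mem_pyRange_one] at hx
      rw [show x = ((x.toNat : Nat) : Int) by omega, PySem.List.pyGetD_natCast]
      obtain ⟨j, hj'⟩ : ∃ j, x.toNat = j + 1 := ⟨x.toNat - 1, by omega⟩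
      have hj : j < mid.length := by push_cast at hx; omega
      rw [hj', List.getD_cons_succ, List.getD_append _ _ _ _ hj,
        List.getD_eq_getElem _ _ hj]
      simp only [beq_iff_eq]
      intro hcontra
      exact hnpm (hcontra ▸ List.getElem_mem hj)
    rw [h1]
    have hlt : ((1 + mid.length : Nat) : Int) < ((mid.length + rest'.length + 3 : Nat) : Int) := by
      push_cast; omega
    rw [PySem.List.pyRange_one_cons hlt]
    rw [List.find?_cons_of_pos]
    · simp
    · rw [PySem.List.pyGetD_natCast, show 1 + mid.length = mid.length + 1 by omega,
        List.getD_cons_succ, List.getD_append_right _ _ _ _ (le_refl mid.length)]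
      simp
  rw [hfind?]
  simp only []
  rw [if_neg (by rw [PySem.List.len_eq, hlen2]; simp; omega)]
  refine Prod.ext rfl (Prod.ext ?_ ?_) <;> simp only
  · -- middle component: tokens[1:idx] = mid
    rw [PySem.List.slice_toNat _ (by omega) (by positivity)]
    have hnum : ((1 + mid.length : Nat) : Int).toNat - (1 : Int).toNat = mid.length := by omega
    rw [hnum, show (1 : Int).toNat = 1 from rfl]
    rw [List.drop_succ_cons, List.drop_zero, List.take_left]
  · -- last component: tokens[idx+1:] = r0 :: rest'
    rw [PySem.List.slice_from _ (by positivity)]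
    have hnum : (((1 + mid.length : Nat) : Int) + 1).toNat = ((p :: mid) ++ [p]).length := by
      simp; omega
    rw [hnum]
    have hgrp : p :: (mid ++ p :: r0 :: rest') = ((p :: mid) ++ [p]) ++ (r0 :: rest') := by simp
    rw [hgrp, List.drop_left]

-- evaluation of port B on the decomposed input
theorem pvB_eval (root : String) (p r0 : List Char) (mid rest' : List (List Char))
    (htok : pvTok root.toList = p :: (mid ++ p :: (r0 :: rest')))
    (hnp : p ∉ mid) (hge : 1 ≤ mid.length + rest'.length) :
    estrai_motori_da_root_alt root
      = (String.ofList p, String.ofList (PySem.Chars.join ['_'] mid),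
         String.ofList (PySem.Chars.join ['_'] (r0 :: rest'))) := by
  have hfree := pvTok_no_sep root.toList
  rw [htok] at hfree
  have hp : '_' ∉ p := hfree p (by simp)
  have hmidfree : ∀ t ∈ mid, '_' ∉ t := fun t ht => hfree t (by simp [ht])
  have hj := pvTok_join root.toList
  rw [htok, pvJ_cons] at hj
  have hshape : root.toList = p ++ (pvT mid ++ '_' :: (p ++ '_' :: (r0 ++ pvT rest'))) := by
    rw [← hj]; simp [pvT]
  have hcount : PySem.Chars.count root.toList ['_'] = mid.length + rest'.length + 2 := by
    rw [pvCount_eq]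
    have hl := pvTok_length root.toList
    rw [htok] at hl
    simp at hl
    omega
  unfold estrai_motori_da_root_alt
  simp only []
  rw [show "_".toList = ['_'] from rfl]
  rw [hcount, if_neg (by omega)]
  -- prefix = p
  have hfind1 : PySem.Chars.find root.toList ['_'] = (p.length : Int) := by
    rw [hshape]
    cases mid with
    | nil =>
      simp only [pvT, List.flatMap_nil, List.nil_append]
      exact pvFind_sep p _ hp
    | cons m mid' =>
      have : pvT (m :: mid') ++ '_' :: (p ++ '_' :: (r0 ++ pvT rest'))
          = '_' :: (m ++ pvT mid' ++ '_' :: (p ++ '_' :: (r0 ++ pvT rest'))) := by simp [pvT]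
      rw [this]
      exact pvFind_sep p _ hp
  have hpref : PySem.Chars.slice root.toList none (some (PySem.Chars.find root.toList ['_'])) = p := by
    rw [hfind1]
    simp only [PySem.Chars.slice_eq_listSlice]
    rw [PySem.List.slice_to _ (by positivity)]
    rw [hshape, Int.toNat_natCast, List.take_left]
  rw [hpref]
  -- pos
  have hpos : PySem.Chars.find root.toList ('_' :: (p ++ ['_'])) = (p.length : Int) + (pvT mid).length := by
    rw [hshape]
    exact pvFind_pat p hp mid _ hmidfree hnp
  rw [hpos]
  rw [if_neg (by simp; omega)]
  refine Prod.ext rfl (Prod.ext ?_ ?_) <;> simp only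
  · -- middle component
    simp only [PySem.Chars.slice_eq_listSlice]
    rw [PySem.List.slice_toNat _ (by positivity) (by positivity)]
    have ha : ((p.length : Int) + 1).toNat = p.length + 1 := by omega
    cases mid with
    | nil =>
      have hnum : ((p.length : Int) + ((pvT ([] : List (List Char))).length : Int)).toNat
          - ((p.length : Int) + 1).toNat = 0 := by
        simp only [pvT, List.flatMap_nil, List.length_nil, Nat.cast_zero, add_zero]
        omega
      rw [hnum]
      simp [PySem.Chars.join, List.intercalate]
    | cons m mid' =>
      have hTm : pvT (m :: mid') = '_' :: (m ++ pvT mid') := by simp [pvT]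
      have hnum : ((p.length : Int) + ((pvT (m :: mid')).length : Int)).toNat
          - ((p.length : Int) + 1).toNat = (m ++ pvT mid').length := by
        rw [hTm]
        simp only [List.length_cons, List.length_append]
        omega
      rw [hnum, ha, hshape, hTm]
      have hgrp : p ++ ('_' :: (m ++ pvT mid') ++ '_' :: (p ++ '_' :: (r0 ++ pvT rest')))
          = (p ++ ['_']) ++ ((m ++ pvT mid') ++ '_' :: (p ++ '_' :: (r0 ++ pvT rest'))) := by
        simp
      rw [hgrp, show p.length + 1 = (p ++ ['_']).length by simp]
      rw [List.drop_left, List.take_left, pvJ_cons]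
  · -- last component
    simp only [PySem.Chars.slice_eq_listSlice]
    rw [PySem.List.slice_from _ (by positivity)]
    have h1 : ((p.length : Int) + ((pvT mid).length : Int) + (p.length : Int) + 2).toNat
        = (p ++ pvT mid ++ '_' :: (p ++ ['_'])).length := by
      simp only [List.length_append, List.length_cons, List.length_nil]
      omega
    rw [h1, hshape]
    have hgrp : p ++ (pvT mid ++ '_' :: (p ++ '_' :: (r0 ++ pvT rest')))
        = (p ++ pvT mid ++ '_' :: (p ++ ['_'])) ++ (r0 ++ pvT rest') := by
      simp
    rw [hgrp, List.drop_left, pvJ_cons]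

-- ===== VERDICT (by name: the statement is the Claim_ definition above) =====
theorem estrai_motori_da_root_spec : Claim_equal_estrai_motori_da_root := by
  intro root _hdom hpre
  unfold Pre_estrai_motori_da_root at hpre
  rw [show "_".toList = ['_'] from rfl, pvSplitOn_eq_tok] at hpre
  obtain ⟨hlen, hmem⟩ := hpre
  -- decompose the token list
  cases hts : pvTok root.toList with
  | nil => exact absurd hts (pvTok_ne_nil _)
  | cons p us =>
    rw [hts] at hlen hmem
    simp only [List.headD_cons, List.drop_succ_cons, List.drop_zero] at hmem
    have hpus : p ∈ us := (List.dropLast_sublist us).subset hmem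
    obtain ⟨mid, rest, heq, hnpm⟩ := pvSplitFirst p us hpus
    cases hrest : rest with
    | nil =>
      rw [hrest] at heq
      rw [heq] at hmem
      rw [List.dropLast_concat] at hmem
      exact absurd hmem hnpm
    | cons r0 rest' =>
      rw [hrest] at heq
      rw [heq] at hts
      unfold Spec_estrai_motori_da_root
      have hge : 1 ≤ mid.length + rest'.length := by
        rw [heq] at hlen
        simp at hlen
        omega
      rw [pvA_eval root p r0 mid rest' hts hnpm hge, pvB_eval root p r0 mid rest' hts hnpm hge]
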